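-- pv_equiv track=rewrite | github.com/chinery/advent-of-code | 2018/6_2.py | drawatdistance
-- ===== SOURCE A (Python) =====
-- def setsymbol(row, col, grid, distance, marker):
--     if row < 0 or row >= len(grid) or col < 0 or col >= len(grid[0]):
--         return True
--     else:
--         grid[row][col] += distance
--         return False
--
-- def drawatdistance(row, col, distance, grid, marker):
--     allhitedges = True
--
--     for r in range(row-distance, row+distance+1):
--         rdist = abs(row-r)
--         ccomplement = distance-rdist
--
--         if not setsymbol(r, col+ccomplement, grid, distance, marker):
--             allhitedges = False
--         if ccomplement != 0:
--             if not setsymbol(r, col-ccomplement, grid, distance, marker):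
--                 allhitedges = False
--
--     return allhitedges
-- ===== SOURCE B (Python) =====
-- def drawatdistance(row, col, distance, grid, marker):
--     # Walk the diamond perimeter directly: start at the top vertex and take
--     # `distance` steps along each of the four edges, visiting each of the
--     # 4*distance perimeter cells exactly once.
--     allhitedges = True
--
--     def touch(r, c):
--         nonlocal allhitedges
--         if 0 <= r < len(grid) and 0 <= c < len(grid[0]):
--             grid[r][c] += distance
--             allhitedges = False
--
--     if distance < 0:
--         return True
--     if distance == 0:
--         touch(row, col)
--         return allhitedges
--
--     r, c = row - distance, col
--     for dr, dc in ((1, 1), (1, -1), (-1, -1), (-1, 1)):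
--         for _ in range(distance):
--             touch(r, c)
--             r += dr
--             c += dc
--     return allhitedges
-- ===== Notes on version B (the rewrite author's own statement) =====
-- stated objective: alternative
-- what changed: B replaces A's row sweep (each row r contributing the cells col±(distance-|row-r|)) by a direct walk of the diamond perimeter: distance steps along each of the four edge vectors (1,1),(1,-1),(-1,-1),(-1,1) starting at the top vertex, visiting each perimeter cell exactly once, with distance==0 touching only the centre.
import Mathlib
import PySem

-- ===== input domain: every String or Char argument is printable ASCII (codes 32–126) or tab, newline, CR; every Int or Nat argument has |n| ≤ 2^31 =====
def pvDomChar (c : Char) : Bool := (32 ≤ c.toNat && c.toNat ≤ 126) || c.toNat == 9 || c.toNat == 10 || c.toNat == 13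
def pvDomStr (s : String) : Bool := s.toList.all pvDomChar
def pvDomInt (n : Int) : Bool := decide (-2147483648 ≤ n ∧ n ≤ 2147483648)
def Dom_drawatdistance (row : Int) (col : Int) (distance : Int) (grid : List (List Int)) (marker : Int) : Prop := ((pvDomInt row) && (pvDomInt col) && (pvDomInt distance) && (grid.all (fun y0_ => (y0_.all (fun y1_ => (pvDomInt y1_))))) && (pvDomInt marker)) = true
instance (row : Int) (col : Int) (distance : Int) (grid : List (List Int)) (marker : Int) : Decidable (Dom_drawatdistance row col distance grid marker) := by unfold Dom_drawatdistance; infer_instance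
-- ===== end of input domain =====

-- B walks the 4*distance diamond-perimeter cells directly along the four edge
-- vectors instead of A's row sweep with per-row |row-r| arithmetic (objective:
-- alternative decomposition, same cost). Both Pythons mutate `grid` identically;
-- the equivalence proved here is about the RETURN value.

-- ===== PORT A =====
-- setsymbol returns (its Python return value, the updated grid).
-- `grid[row][col] += distance` is ported as List.modify; exact on Pre_ inputs
-- (Pre_ excludes the ragged grids on which Python's element assignment raises).
def pySetsymbol (row : Int) (col : Int) (grid : List (List Int)) (distance : Int) (marker : Int) :
    Bool × List (List Int) :=
  if row < 0 ∨ (grid.length : Int) ≤ row ∨ col < 0 ∨ ((grid.headD []).length : Int) ≤ col then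
    (true, grid)
  else
    (false, grid.modify row.toNat (fun rw => rw.modify col.toNat (· + distance)))

-- the body of A's for-loop (state: allhitedges, grid)
def aStep (row : Int) (col : Int) (distance : Int) (marker : Int)
    (st : Bool × List (List Int)) (r : Int) : Bool × List (List Int) :=
  let rdist := |row - r|
  let ccomplement := distance - rdist
  let res1 := pySetsymbol r (col + ccomplement) st.2 distance marker
  let st1 : Bool × List (List Int) := (if res1.1 then st.1 else false, res1.2)
  if ccomplement ≠ 0 then
    let res2 := pySetsymbol r (col - ccomplement) st1.2 distance marker
    (if res2.1 then st1.1 else false, res2.2)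
  else st1

def drawatdistance (row : Int) (col : Int) (distance : Int) (grid : List (List Int)) (marker : Int) : Bool :=
  ((PySem.List.pyRange (row - distance) (row + distance + 1) 1).foldl
    (aStep row col distance marker) (true, grid)).1

-- ===== PORT B =====
-- B's `touch`: in-bounds => add distance and clear allhitedges, else no-op.
def altTouch (distance : Int) (st : Bool × List (List Int)) (rc : Int × Int) :
    Bool × List (List Int) :=
  if 0 ≤ rc.1 ∧ rc.1 < (st.2.length : Int) ∧ 0 ≤ rc.2 ∧ rc.2 < ((st.2.headD []).length : Int) then
    (false, st.2.modify rc.1.toNat (fun rw => rw.modify rc.2.toNat (· + distance)))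
  else st

-- one diamond edge: n steps from `start` along direction (dr, dc)
def altSeg (start : Int × Int) (dr : Int) (dc : Int) (n : Nat) : List (Int × Int) :=
  (List.range n).map (fun i => (start.1 + dr * i, start.2 + dc * i))

def drawatdistance_alt (row : Int) (col : Int) (distance : Int) (grid : List (List Int)) (marker : Int) : Bool :=
  if distance < 0 then true
  else if distance = 0 then (altTouch distance (true, grid) (row, col)).1
  else
    let n := distance.toNat
    let perim :=
      altSeg (row - distance, col) 1 1 n ++ altSeg (row, col + distance) 1 (-1) n ++
      altSeg (row + distance, col) (-1) (-1) n ++ altSeg (row, col - distance) (-1) 1 n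
    (perim.foldl (altTouch distance) (true, grid)).1

-- ===== PRECONDITION & SPEC =====
-- Pre_ excludes exactly the ragged grids on which A raises IndexError: a touched
-- diamond cell (r,c) that passes A's guard (which measures columns against
-- len(grid[0])) but lands in a row r shorter than c+1, so `grid[r][c] += distance`
-- raises. On rectangular grids Pre_ always holds.
def Pre_drawatdistance (row : Int) (col : Int) (distance : Int) (grid : List (List Int)) (marker : Int) : Prop :=
  ∀ i ∈ List.range grid.length,
    ∀ c ∈ [col + (distance - |row - (i : Int)|), col - (distance - |row - (i : Int)|)],
      (|row - (i : Int)| ≤ distance ∧ 0 ≤ c ∧ c < ((grid.headD []).length : Int)) →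
        c < ((grid.getD i []).length : Int)
instance (row : Int) (col : Int) (distance : Int) (grid : List (List Int)) (marker : Int) : Decidable (Pre_drawatdistance row col distance grid marker) := by unfold Pre_drawatdistance; infer_instance

def pvWitness_drawatdistance : Int × Int × Int × List (List Int) × Int :=
  (1, 1, 1, [[0, 0, 0], [0, 0, 0], [0, 0, 0]], 5)

def Spec_drawatdistance (row : Int) (col : Int) (distance : Int) (grid : List (List Int)) (marker : Int) (out : Bool) : Prop := out = drawatdistance_alt row col distance grid marker
instance (row : Int) (col : Int) (distance : Int) (grid : List (List Int)) (marker : Int) (out : Bool) : Decidable (Spec_drawatdistance row col distance grid marker out) := by unfold Spec_drawatdistance; infer_instance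

-- ===== CLAIM (what is proved, stated in full; the proofs are below) =====
def Claim_equal_drawatdistance : Prop := ∀ (row : Int) (col : Int) (distance : Int) (grid : List (List Int)) (marker : Int), Dom_drawatdistance row col distance grid marker → Pre_drawatdistance row col distance grid marker → Spec_drawatdistance row col distance grid marker (drawatdistance row col distance grid marker)

-- ===== LEMMAS AND PROOFS =====

-- "out of bounds" for a grid of n rows and m columns
def oob (n m : Nat) (r c : Int) : Bool :=
  decide (¬ (0 ≤ r ∧ r < (n : Int) ∧ 0 ≤ c ∧ c < (m : Int)))

-- the per-row condition A's loop accumulates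
def condA (n m : Nat) (row col distance r : Int) : Bool :=
  oob n m r (col + (distance - |row - r|)) &&
    (decide (distance - |row - r| = 0) || oob n m r (col - (distance - |row - r|)))

theorem modify2_shape (g : List (List Int)) (i j : Nat) (d : Int) :
    (g.modify i (fun rw => rw.modify j (· + d))).length = g.length ∧
    ((g.modify i (fun rw => rw.modify j (· + d))).headD []).length = (g.headD []).length := by
  refine ⟨by simp [List.length_modify], ?_⟩
  cases g with
  | nil => simp
  | cons h t =>
    cases i with
    | zero => simp [List.modify]
    | succ k => simp [List.modify]

theorem pySetsymbol_fst (r c : Int) (g : List (List Int)) (d mk : Int) :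
    (pySetsymbol r c g d mk).1 = oob g.length (g.headD []).length r c := by
  unfold pySetsymbol oob
  split_ifs with h
  · exact (decide_eq_true (by omega)).symm
  · exact (decide_eq_false (by omega)).symm

theorem pySetsymbol_shape (r c : Int) (g : List (List Int)) (d mk : Int) :
    (pySetsymbol r c g d mk).2.length = g.length ∧
    ((pySetsymbol r c g d mk).2.headD []).length = (g.headD []).length := by
  unfold pySetsymbol
  split_ifs with h
  · exact ⟨rfl, rfl⟩
  · exact modify2_shape g r.toNat c.toNat d

theorem aStep_char (row col distance marker : Int) (n m : Nat)
    (st : Bool × List (List Int)) (r : Int)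
    (hn : st.2.length = n) (hm : (st.2.headD []).length = m) :
    (aStep row col distance marker st r).1 = (st.1 && condA n m row col distance r) ∧
    (aStep row col distance marker st r).2.length = n ∧
    ((aStep row col distance marker st r).2.headD []).length = m := by
  subst hn hm
  have ite1 : ∀ (x b : Bool), (if x = true then b else false) = (b && x) := by decide
  by_cases h : distance - |row - r| = 0
  · have e : aStep row col distance marker st r =
        ((if (pySetsymbol r (col + (distance - |row - r|)) st.2 distance marker).1 = true
            then st.1 else false),
         (pySetsymbol r (col + (distance - |row - r|)) st.2 distance marker).2) := by
      simp only [aStep]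
      rw [if_neg (by simp [h])]
    rw [e]
    refine ⟨?_, (pySetsymbol_shape _ _ _ _ _).1, (pySetsymbol_shape _ _ _ _ _).2⟩
    simp only [ite1, pySetsymbol_fst, condA, h, decide_true, Bool.true_or,
      Bool.and_true, sub_zero]
  · have e : aStep row col distance marker st r =
        ((if (pySetsymbol r (col - (distance - |row - r|))
                (pySetsymbol r (col + (distance - |row - r|)) st.2 distance marker).2
                distance marker).1 = true
            then (if (pySetsymbol r (col + (distance - |row - r|)) st.2 distance marker).1 = true
                    then st.1 else false)
            else false),
         (pySetsymbol r (col - (distance - |row - r|))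
            (pySetsymbol r (col + (distance - |row - r|)) st.2 distance marker).2
            distance marker).2) := by
      simp only [aStep]
      rw [if_pos h]
    rw [e]
    have s1 := pySetsymbol_shape r (col + (distance - |row - r|)) st.2 distance marker
    have s2 := pySetsymbol_shape r (col - (distance - |row - r|))
      (pySetsymbol r (col + (distance - |row - r|)) st.2 distance marker).2 distance marker
    refine ⟨?_, by rw [s2.1, s1.1], by rw [s2.2, s1.2]⟩
    simp only [ite1, pySetsymbol_fst, condA, s1.1, s1.2]
    have hd : decide (distance - |row - r| = 0) = false := by simp [h]
    rw [hd]
    cases st.1 <;>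
      cases oob st.2.length (st.2.headD []).length r (col + (distance - |row - r|)) <;>
        cases oob st.2.length (st.2.headD []).length r (col - (distance - |row - r|)) <;> rfl

theorem foldA (row col distance marker : Int) (n m : Nat) :
    ∀ (l : List Int) (b : Bool) (g : List (List Int)),
      g.length = n → (g.headD []).length = m →
      (l.foldl (aStep row col distance marker) (b, g)).1
        = (b && l.all (fun r => condA n m row col distance r)) := by
  intro l
  induction l with
  | nil => intro b g _ _; simp
  | cons r t ih =>
    intro b g hn hm
    have h := aStep_char row col distance marker n m (b, g) r hn hm
    simp only [List.foldl_cons, List.all_cons]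
    rw [show aStep row col distance marker (b, g) r
        = ((aStep row col distance marker (b, g) r).1, (aStep row col distance marker (b, g) r).2) from rfl,
      ih _ _ h.2.1 h.2.2, h.1, Bool.and_assoc]

theorem altTouch_char (d : Int) (n m : Nat) (st : Bool × List (List Int)) (rc : Int × Int)
    (hn : st.2.length = n) (hm : (st.2.headD []).length = m) :
    (altTouch d st rc).1 = (st.1 && oob n m rc.1 rc.2) ∧
    (altTouch d st rc).2.length = n ∧
    ((altTouch d st rc).2.headD []).length = m := by
  subst hn hm
  unfold altTouch
  split_ifs with h
  · have hb : oob st.2.length (st.2.headD []).length rc.1 rc.2 = false := by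
      simp only [oob, decide_eq_false_iff_not, not_not]; exact h
    exact ⟨by rw [hb]; simp, (modify2_shape _ _ _ _).1, (modify2_shape _ _ _ _).2⟩
  · have hb : oob st.2.length (st.2.headD []).length rc.1 rc.2 = true := by
      simp only [oob, decide_eq_true_iff]; exact h
    exact ⟨by rw [hb]; simp, rfl, rfl⟩

theorem foldB (d : Int) (n m : Nat) :
    ∀ (l : List (Int × Int)) (b : Bool) (g : List (List Int)),
      g.length = n → (g.headD []).length = m →
      (l.foldl (altTouch d) (b, g)).1 = (b && l.all (fun rc => oob n m rc.1 rc.2)) := by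
  intro l
  induction l with
  | nil => intro b g _ _; simp
  | cons rc t ih =>
    intro b g hn hm
    have h := altTouch_char d n m (b, g) rc hn hm
    simp only [List.foldl_cons, List.all_cons]
    rw [show altTouch d (b, g) rc = ((altTouch d (b, g) rc).1, (altTouch d (b, g) rc).2) from rfl,
      ih _ _ h.2.1 h.2.2, h.1, Bool.and_assoc]

theorem altSeg_all (s : Int × Int) (dr dc : Int) (n : Nat) (p : Int × Int → Bool) :
    (altSeg s dr dc n).all p = true ↔
      ∀ i : Nat, i < n → p (s.1 + dr * (i : Int), s.2 + dc * (i : Int)) = true := by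
  simp [altSeg, List.all_eq_true]

theorem Qcongr (Q : Int → Int → Prop) {a b a' b' : Int} (h : Q a b) (ha : a = a') (hb : b = b') :
    Q a' b' := ha ▸ hb ▸ h

-- the geometric heart: A's row sweep and B's four edge walks cover the same cells
theorem diamond_iff (row col d : Int) (hd : 0 < d) (Q : Int → Int → Prop) :
    (∀ r, row - d ≤ r → r < row + d + 1 →
        Q r (col + (d - |row - r|)) ∧ (d - |row - r| = 0 ∨ Q r (col - (d - |row - r|))))
    ↔ ((∀ i : Nat, i < d.toNat → Q (row - d + i) (col + i)) ∧
       (∀ i : Nat, i < d.toNat → Q (row + i) (col + d - i)) ∧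
       (∀ i : Nat, i < d.toNat → Q (row + d - i) (col - i)) ∧
       (∀ i : Nat, i < d.toNat → Q (row - i) (col - d + i))) := by
  constructor
  · intro h
    refine ⟨fun i hi => ?_, fun i hi => ?_, fun i hi => ?_, fun i hi => ?_⟩
    · -- edge 1: (row - d + i, col + i), comp = i, the "col + comp" cell
      have H := (h (row - d + (i : Int)) (by omega) (by omega)).1
      have ha : |row - (row - d + (i : Int))| = d - (i : Int) := by
        rw [show row - (row - d + (i : Int)) = d - (i : Int) by ring]
        exact abs_of_nonneg (by omega)
      rw [ha] at H
      exact Qcongr Q H (by omega) (by omega)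
    · -- edge 2: (row + i, col + d - i), comp = d - i, the "col + comp" cell
      have H := (h (row + (i : Int)) (by omega) (by omega)).1
      have ha : |row - (row + (i : Int))| = (i : Int) := by
        rw [show row - (row + (i : Int)) = -(i : Int) by ring, abs_neg]
        exact abs_of_nonneg (by omega)
      rw [ha] at H
      exact Qcongr Q H (by omega) (by omega)
    · -- edge 3: (row + d - i, col - i), comp = i
      by_cases hi0 : i = 0
      · subst hi0
        have H := (h (row + d) (by omega) (by omega)).1
        have ha : |row - (row + d)| = d := by
          rw [show row - (row + d) = -d by ring, abs_neg]
          exact abs_of_nonneg (by omega)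
        rw [ha] at H
        exact Qcongr Q H (by omega) (by omega)
      · have H := (h (row + d - (i : Int)) (by omega) (by omega)).2
        have ha : |row - (row + d - (i : Int))| = d - (i : Int) := by
          rw [show row - (row + d - (i : Int)) = -(d - (i : Int)) by ring, abs_neg]
          exact abs_of_nonneg (by omega)
        rw [ha] at H
        have H' := H.resolve_left (by omega)
        exact Qcongr Q H' (by omega) (by omega)
    · -- edge 4: (row - i, col - d + i), comp = d - i ≠ 0, the "col - comp" cell
      have H := (h (row - (i : Int)) (by omega) (by omega)).2
      have ha : |row - (row - (i : Int))| = (i : Int) := by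
        rw [show row - (row - (i : Int)) = (i : Int) by ring]
        exact abs_of_nonneg (by omega)
      rw [ha] at H
      have H' := H.resolve_left (by omega)
      exact Qcongr Q H' (by omega) (by omega)
  · rintro ⟨h1, h2, h3, h4⟩ r hr1 hr2
    constructor
    · -- the "col + comp" cell of row r
      by_cases hle : r ≤ row
      · have ha : |row - r| = row - r := abs_of_nonneg (by omega)
        rw [ha]
        by_cases hr : r = row
        · exact Qcongr Q (h2 0 (by omega)) (by omega) (by omega)
        · exact Qcongr Q (h1 ((r - (row - d)).toNat) (by omega)) (by omega) (by omega)
      · have ha : |row - r| = r - row := by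
          rw [show row - r = -(r - row) by ring, abs_neg]
          exact abs_of_nonneg (by omega)
        rw [ha]
        by_cases hr : r = row + d
        · exact Qcongr Q (h3 0 (by omega)) (by omega) (by omega)
        · exact Qcongr Q (h2 ((r - row).toNat) (by omega)) (by omega) (by omega)
    · -- the "col - comp" cell of row r (only when comp ≠ 0)
      by_cases hc : d - |row - r| = 0
      · exact Or.inl hc
      · refine Or.inr ?_
        by_cases hle : r ≤ row
        · have ha : |row - r| = row - r := abs_of_nonneg (by omega)
          rw [ha] at hc ⊢
          exact Qcongr Q (h4 ((row - r).toNat) (by omega)) (by omega) (by omega)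
        · have ha : |row - r| = r - row := by
            rw [show row - r = -(r - row) by ring, abs_neg]
            exact abs_of_nonneg (by omega)
          rw [ha] at hc ⊢
          exact Qcongr Q (h3 ((row + d - r).toNat) (by omega)) (by omega) (by omega)

-- ===== VERDICT (by name: the statement is the Claim_ definition above) =====
theorem drawatdistance_spec : Claim_equal_drawatdistance := by
  intro row col distance grid marker _ _
  unfold Spec_drawatdistance
  simp only [drawatdistance, drawatdistance_alt]
  rw [foldA row col distance marker grid.length (grid.headD []).length _ true grid rfl rfl]
  split_ifs with hneg hzero
  · -- distance < 0: the range is empty, both sides are true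
    simp only [Bool.true_and]
    refine List.all_eq_true.mpr fun r hr => ?_
    rw [PySem.List.mem_pyRange_one] at hr
    exact absurd hr (by omega)
  · -- distance = 0: only the centre cell is touched
    subst hzero
    rw [(altTouch_char 0 grid.length (grid.headD []).length (true, grid) (row, col) rfl rfl).1]
    simp only [Bool.true_and]
    have hcond : condA grid.length (grid.headD []).length row col 0 row
        = oob grid.length (grid.headD []).length row col := by
      simp [condA]
    rw [Bool.eq_iff_iff]
    simp only [List.all_eq_true, PySem.List.mem_pyRange_one]
    constructor
    · intro hall
      rw [← hcond]
      exact hall row ⟨by omega, by omega⟩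
    · intro hb r hr
      have : r = row := by omega
      subst this
      rw [hcond]
      exact hb
  · -- distance > 0: the row sweep and the perimeter walk cover the same cells
    rw [foldB distance grid.length (grid.headD []).length _ true grid rfl rfl]
    simp only [Bool.true_and]
    rw [Bool.eq_iff_iff, List.all_append, List.all_append, List.all_append]
    simp only [Bool.and_eq_true]
    rw [altSeg_all, altSeg_all, altSeg_all, altSeg_all]
    simp only [List.all_eq_true, PySem.List.mem_pyRange_one, condA, Bool.and_eq_true,
      Bool.or_eq_true, decide_eq_true_eq, and_imp]
    have D := diamond_iff row col distance (by omega)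
      (fun r c => oob grid.length (grid.headD []).length r c = true)
    constructor
    · intro hA
      obtain ⟨T1, T2, T3, T4⟩ := D.mp hA
      refine ⟨⟨⟨fun i hi => ?_, fun i hi => ?_⟩, fun i hi => ?_⟩, fun i hi => ?_⟩
      · exact Qcongr (fun r c => oob grid.length (grid.headD []).length r c = true)
          (T1 i hi) (by ring) (by ring)
      · exact Qcongr (fun r c => oob grid.length (grid.headD []).length r c = true)
          (T2 i hi) (by ring) (by ring)
      · exact Qcongr (fun r c => oob grid.length (grid.headD []).length r c = true)
          (T3 i hi) (by ring) (by ring)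
      · exact Qcongr (fun r c => oob grid.length (grid.headD []).length r c = true)
          (T4 i hi) (by ring) (by ring)
    · rintro ⟨⟨⟨S1, S2⟩, S3⟩, S4⟩
      refine D.mpr ⟨fun i hi => ?_, fun i hi => ?_, fun i hi => ?_, fun i hi => ?_⟩
      · exact Qcongr (fun r c => oob grid.length (grid.headD []).length r c = true)
          (S1 i hi) (by ring) (by ring)
      · exact Qcongr (fun r c => oob grid.length (grid.headD []).length r c = true)
          (S2 i hi) (by ring) (by ring)
      · exact Qcongr (fun r c => oob grid.length (grid.headD []).length r c = true)
          (S3 i hi) (by ring) (by ring)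
      · exact Qcongr (fun r c => oob grid.length (grid.headD []).length r c = true)
          (S4 i hi) (by ring) (by ring)
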